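-- pv_equiv track=rewrite | github.com/ucscCancer/pathway_tools | scripts/mPathway.py | getUpstream
-- ===== SOURCE A (Python) =====
-- from copy import deepcopy
--
-- def reverseInteractions(pInteractions):
--     """reverse interaction mapping"""
--     rpInteractions = dict()
--     for i in pInteractions.keys():
--         for j in pInteractions[i].keys():
--             if j not in rpInteractions:
--                 rpInteractions[j] = dict()
--             rpInteractions[j][i] = pInteractions[i][j]
--     return(rpInteractions)
--
-- def getUpstream(node, distance, pInteractions):
--     """returns downstream neighbors of distance"""
--     rpInteractions = reverseInteractions(pInteractions)
--     seenNodes = set([node])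
--     borderNodes = [node]
--     frontierNodes = []
--     for dist in range(distance):
--         while len(borderNodes) > 0:
--             currNode = borderNodes.pop()
--             if currNode in rpInteractions:
--                 for i in rpInteractions[currNode].keys():
--                     if i not in seenNodes:
--                         seenNodes.update([i])
--                         frontierNodes.append(i)
--         borderNodes = deepcopy(frontierNodes)
--         frontierNodes = list()
--     return(seenNodes)
-- ===== SOURCE B (Python) =====
-- def getUpstream(node, distance, pInteractions):
--     """upstream nodes within distance: bounded BFS that rescans the forward
--     interaction dict at each expansion instead of prebuilding a reverse map"""
--     seenNodes = {node}
--     borderNodes = [node]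
--     for dist in range(distance):
--         frontierNodes = []
--         while len(borderNodes) > 0:
--             currNode = borderNodes.pop()
--             for i in pInteractions:
--                 if currNode in pInteractions[i] and i not in seenNodes:
--                     seenNodes.add(i)
--                     frontierNodes.append(i)
--         borderNodes = frontierNodes
--     return seenNodes
-- ===== Notes on version B (the rewrite author's own statement) =====
-- stated objective: alternative
-- what changed: B drops the reverseInteractions prebuilt reverse-adjacency table entirely and performs the bounded BFS by rescanning the forward interaction dict for matching sources at each frontier node.
import Mathlib
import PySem

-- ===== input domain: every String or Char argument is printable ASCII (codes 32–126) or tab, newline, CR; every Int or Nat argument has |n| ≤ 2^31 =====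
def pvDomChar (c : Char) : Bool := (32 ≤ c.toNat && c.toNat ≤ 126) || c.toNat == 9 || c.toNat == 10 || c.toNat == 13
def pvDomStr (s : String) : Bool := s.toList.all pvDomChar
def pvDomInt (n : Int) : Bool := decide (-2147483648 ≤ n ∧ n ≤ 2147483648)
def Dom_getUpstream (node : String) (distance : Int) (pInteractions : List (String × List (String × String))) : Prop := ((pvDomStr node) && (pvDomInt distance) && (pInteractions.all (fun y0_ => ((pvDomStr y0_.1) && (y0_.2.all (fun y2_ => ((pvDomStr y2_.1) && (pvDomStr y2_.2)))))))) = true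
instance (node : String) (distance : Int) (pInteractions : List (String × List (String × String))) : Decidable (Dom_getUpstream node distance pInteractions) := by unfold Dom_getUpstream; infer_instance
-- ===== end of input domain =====

-- ===== PORT A =====
-- One-line summary: B drops the prebuilt reverse-adjacency table (reverseInteractions) and instead
-- rescans the forward interaction dict at each frontier node; the returned node set is proved equal.

-- A-side helper: the body of A's innermost loop ('if j not in rp: rp[j] = {}; rp[j][i] = pInteractions[i][j]')
def revInner (di : PySem.Dict String String) (i : String)
    (rp : PySem.Dict String (PySem.Dict String String)) (j : String) :
    PySem.Dict String (PySem.Dict String String) :=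
  let rp' := if rp.contains j then rp else rp.insert j PySem.Dict.empty
  rp'.modify j PySem.Dict.empty (fun d => d.insert i (di.getD j ""))

-- A-side helper: literal port of reverseInteractions (nested loops over the keys)
def reverseInteractions (pInteractions : List (String × List (String × String))) :
    PySem.Dict String (PySem.Dict String String) :=
  let pI : PySem.Dict String (List (String × String)) := PySem.Dict.ofList pInteractions
  pI.keys.foldl (fun rp i =>
    let di : PySem.Dict String String := PySem.Dict.ofList (pI.getD i [])
    di.keys.foldl (revInner di i) rp)
    PySem.Dict.empty

-- A-side helper: the inner 'while len(borderNodes) > 0' loop (pop from the end)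
def aWhile (rp : PySem.Dict String (PySem.Dict String String)) :
    List String → PySem.Set String → List String → PySem.Set String × List String
  | [], seen, frontier => (seen, frontier)
  | b :: bs, seen, frontier =>
      let currNode := (b :: bs).getLast (by simp)
      let rest := (b :: bs).dropLast
      -- if currNode in rpInteractions: for i in rpInteractions[currNode].keys(): ...
      let ks := if rp.contains currNode then (rp.getD currNode PySem.Dict.empty).keys else []
      let st := ks.foldl (fun (st : PySem.Set String × List String) i =>
          if i ∈ st.1 then st else (PySem.Set.add st.1 i, st.2 ++ [i])) (seen, frontier)
      aWhile rp rest st.1 st.2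
  termination_by border => border.length
  decreasing_by simp

def getUpstream (node : String) (distance : Int) (pInteractions : List (String × List (String × String))) : List String :=
  let rp := reverseInteractions pInteractions
  ((PySem.List.pyRange 0 distance 1).foldl (fun (st : PySem.Set String × List String) _ =>
      aWhile rp st.2 st.1 [])
    (PySem.Set.ofList [node], [node])).1

-- ===== PORT B =====
-- B-side helper: same frontier loop, but scanning the forward dict for sources of currNode
def bWhile (pI : PySem.Dict String (List (String × String))) :
    List String → PySem.Set String → List String → PySem.Set String × List String
  | [], seen, frontier => (seen, frontier)
  | b :: bs, seen, frontier =>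
      let currNode := (b :: bs).getLast (by simp)
      let rest := (b :: bs).dropLast
      -- for i in pInteractions: if currNode in pInteractions[i] and i not in seenNodes: ...
      let st := pI.keys.foldl (fun (st : PySem.Set String × List String) i =>
          if (PySem.Dict.ofList (pI.getD i [])).contains currNode && !(PySem.Set.contains st.1 i)
          then (PySem.Set.add st.1 i, st.2 ++ [i]) else st) (seen, frontier)
      bWhile pI rest st.1 st.2
  termination_by border => border.length
  decreasing_by simp

def getUpstream_alt (node : String) (distance : Int) (pInteractions : List (String × List (String × String))) : List String :=
  let pI : PySem.Dict String (List (String × String)) := PySem.Dict.ofList pInteractions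
  ((PySem.List.pyRange 0 distance 1).foldl (fun (st : PySem.Set String × List String) _ =>
      bWhile pI st.2 st.1 [])
    (PySem.Set.ofList [node], [node])).1

-- ===== PRECONDITION & SPEC =====
def Spec_getUpstream (node : String) (distance : Int) (pInteractions : List (String × List (String × String))) (out : List String) : Prop := out = getUpstream_alt node distance pInteractions
instance (node : String) (distance : Int) (pInteractions : List (String × List (String × String))) (out : List String) : Decidable (Spec_getUpstream node distance pInteractions out) := by unfold Spec_getUpstream; infer_instance

-- ===== CLAIM (what is proved, stated in full; the proofs are below) =====
def Claim_equal_getUpstream : Prop := ∀ (node : String) (distance : Int) (pInteractions : List (String × List (String × String))), Dom_getUpstream node distance pInteractions → Spec_getUpstream node distance pInteractions (getUpstream node distance pInteractions)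

-- ===== LEMMAS AND PROOFS =====

-- one revInner step changes exactly the inner dict at j0, inserting key i there
theorem revInner_getD (di : PySem.Dict String String) (i : String)
    (rp : PySem.Dict String (PySem.Dict String String)) (j0 j : String) :
    ((revInner di i rp j0).getD j PySem.Dict.empty) =
      if j = j0 then (rp.getD j0 PySem.Dict.empty).insert i (di.getD j0 "") else rp.getD j PySem.Dict.empty := by
  unfold revInner
  by_cases h : rp.contains j0 = true
  · simp [h, PySem.Dict.getD_modify]
  · have hf : rp.contains j0 = false := by simpa using h
    have h0 : rp.getD j0 PySem.Dict.empty = PySem.Dict.empty :=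
      PySem.Dict.getD_of_not_contains rp PySem.Dict.empty hf
    by_cases hj : j = j0 <;>
      simp [hf, hj, PySem.Dict.getD_modify, PySem.Dict.getD_insert, h0]

-- inner fold over the (nodup) keys of di: key i is appended to the inner dict at exactly the j ∈ js
theorem inner_keysAt (di : PySem.Dict String String) (i : String) :
    ∀ (js : List String) (rp : PySem.Dict String (PySem.Dict String String)),
    js.Nodup → (∀ j ∈ js, i ∉ (rp.getD j PySem.Dict.empty).keys) →
    ∀ j, ((js.foldl (revInner di i) rp).getD j PySem.Dict.empty).keys
        = (rp.getD j PySem.Dict.empty).keys ++ (if j ∈ js then [i] else []) := by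
  intro js
  induction js with
  | nil => intro rp _ _ j; simp
  | cons j0 rest ih =>
      intro rp hnd hfresh j
      simp only [List.foldl_cons]
      have hfresh' : ∀ j ∈ rest, i ∉ ((revInner di i rp j0).getD j PySem.Dict.empty).keys := by
        intro j hj
        rw [revInner_getD]
        have hne : j ≠ j0 := by rintro rfl; exact (List.nodup_cons.mp hnd).1 hj
        simp only [hne, if_false]
        exact hfresh j (List.mem_cons_of_mem _ hj)
      rw [ih (revInner di i rp j0) (List.nodup_cons.mp hnd).2 hfresh' j, revInner_getD]
      by_cases hj : j = j0
      · subst hj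
        have hj0r : j ∉ rest := (List.nodup_cons.mp hnd).1
        have hi : i ∉ (rp.getD j PySem.Dict.empty).keys := hfresh j (by simp)
        have hk : ((rp.getD j PySem.Dict.empty).insert i (di.getD j "")).keys
             = (rp.getD j PySem.Dict.empty).keys ++ [i] := by
          apply PySem.Dict.keys_insert_of_not_contains
          rw [PySem.Dict.contains_eq_decide_mem_keys]
          simpa using hi
        simp [hk, hj0r]
      · simp [hj]

-- outer fold: the reverse map's keys at j are exactly the processed forward keys whose dict contains j
theorem outer_keysAt (P : PySem.Dict String (List (String × String))) :
    ∀ (ks : List String) (acc : List String) (rp : PySem.Dict String (PySem.Dict String String)),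
    (acc ++ ks).Nodup →
    (∀ j, (rp.getD j PySem.Dict.empty).keys
        = acc.filter (fun i => (PySem.Dict.ofList (P.getD i [])).contains j)) →
    ∀ j, ((ks.foldl (fun rp i =>
            (PySem.Dict.ofList (P.getD i [])).keys.foldl (revInner (PySem.Dict.ofList (P.getD i [])) i) rp)
          rp).getD j PySem.Dict.empty).keys
        = (acc ++ ks).filter (fun i => (PySem.Dict.ofList (P.getD i [])).contains j) := by
  intro ks
  induction ks with
  | nil => intro acc rp _ hinv j; simpa using hinv j
  | cons i rest ih =>
      intro acc rp hnd hinv j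
      simp only [List.foldl_cons]
      have hnd0 := hnd
      rw [List.nodup_middle, List.nodup_cons] at hnd
      have hiacc : i ∉ acc := fun h => hnd.1 (List.mem_append_left _ h)
      have hfresh : ∀ j' ∈ (PySem.Dict.ofList (P.getD i [])).keys,
          i ∉ (rp.getD j' PySem.Dict.empty).keys := by
        intro j' _ hmem
        rw [hinv j'] at hmem
        exact hiacc (List.mem_of_mem_filter hmem)
      have hstep := inner_keysAt (PySem.Dict.ofList (P.getD i [])) i
        (PySem.Dict.ofList (P.getD i [])).keys rp (PySem.Dict.nodup_keys_ofList _) hfresh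
      have hinv' : ∀ j', (((PySem.Dict.ofList (P.getD i [])).keys.foldl
            (revInner (PySem.Dict.ofList (P.getD i [])) i) rp).getD j' PySem.Dict.empty).keys
          = (acc ++ [i]).filter (fun i' => (PySem.Dict.ofList (P.getD i' [])).contains j') := by
        intro j'
        rw [hstep j', hinv j', List.filter_append]
        congr 1
        rw [List.filter_singleton]
        by_cases hm : j' ∈ (PySem.Dict.ofList (P.getD i [])).keys <;>
          simp [hm, PySem.Dict.contains_eq_decide_mem_keys]
      have hnd' : ((acc ++ [i]) ++ rest).Nodup := by
        simpa using hnd0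
      have := ih (acc ++ [i]) _ hnd' hinv' j
      rwa [List.append_cons acc i rest]

-- A's iteration list at currNode = the forward keys whose interaction dict contains currNode
theorem keysAt_reverseInteractions (pInteractions : List (String × List (String × String))) (j : String) :
    (if (reverseInteractions pInteractions).contains j then
       ((reverseInteractions pInteractions).getD j PySem.Dict.empty).keys else []) =
    ((PySem.Dict.ofList pInteractions : PySem.Dict String (List (String × String))).keys).filter
      (fun i => (PySem.Dict.ofList ((PySem.Dict.ofList pInteractions :
          PySem.Dict String (List (String × String))).getD i [])).contains j) := by
  have h := outer_keysAt (PySem.Dict.ofList pInteractions)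
      (PySem.Dict.ofList pInteractions).keys [] PySem.Dict.empty
      (by simp [PySem.Dict.nodup_keys_ofList])
      (fun j' => by simp [PySem.Dict.getD_empty, PySem.Dict.keys_empty]) j
  simp only [List.nil_append] at h
  have h' : ((reverseInteractions pInteractions).getD j PySem.Dict.empty).keys
      = ((PySem.Dict.ofList pInteractions : PySem.Dict String (List (String × String))).keys).filter
        (fun i => (PySem.Dict.ofList ((PySem.Dict.ofList pInteractions :
            PySem.Dict String (List (String × String))).getD i [])).contains j) := h
  rw [← h']
  by_cases hc : (reverseInteractions pInteractions).contains j = true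
  · simp [hc]
  · have he : (reverseInteractions pInteractions).getD j PySem.Dict.empty = PySem.Dict.empty :=
      PySem.Dict.getD_of_not_contains _ _ (by simpa using hc)
    simp [hc, he, PySem.Dict.keys_empty]

-- folding the seen/frontier update over a filtered list = folding the guarded update over the whole list
theorem foldl_filter_guard {α β : Type} (p : α → Bool) (f : β → α → β) :
    ∀ (l : List α) (init : β),
    (l.filter p).foldl f init = l.foldl (fun s x => if p x then f s x else s) init := by
  intro l
  induction l with
  | nil => intro init; rfl
  | cons x xs ih =>
      intro init
      by_cases h : p x = true <;> simp [List.filter, h, ih]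

-- the per-currNode expansion of A and of B produce the same (seen, frontier) state
theorem step_eq (pInteractions : List (String × List (String × String))) (currNode : String)
    (st : PySem.Set String × List String) :
    (if (reverseInteractions pInteractions).contains currNode then
       ((reverseInteractions pInteractions).getD currNode PySem.Dict.empty).keys else []).foldl
      (fun (st : PySem.Set String × List String) i =>
        if i ∈ st.1 then st else (PySem.Set.add st.1 i, st.2 ++ [i])) st =
    ((PySem.Dict.ofList pInteractions : PySem.Dict String (List (String × String))).keys).foldl
      (fun (st : PySem.Set String × List String) i =>
        if (PySem.Dict.ofList ((PySem.Dict.ofList pInteractions :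
              PySem.Dict String (List (String × String))).getD i [])).contains currNode
            && !(PySem.Set.contains st.1 i)
        then (PySem.Set.add st.1 i, st.2 ++ [i]) else st) st := by
  rw [keysAt_reverseInteractions pInteractions currNode, foldl_filter_guard]
  apply PySem.List.foldl_congr_mem'
  intro i _ acc
  by_cases hp : (PySem.Dict.ofList ((PySem.Dict.ofList pInteractions :
      PySem.Dict String (List (String × String))).getD i [])).contains currNode = true <;>
    by_cases hm : i ∈ acc.1 <;>
      simp [hp, hm, PySem.Set.contains_eq_listContains]

theorem aWhile_eq_bWhile (pInteractions : List (String × List (String × String))) :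
    ∀ (border : List String) (seen : PySem.Set String) (frontier : List String),
    aWhile (reverseInteractions pInteractions) border seen frontier =
    bWhile (PySem.Dict.ofList pInteractions) border seen frontier := by
  have main : ∀ (n : Nat) (border : List String), border.length ≤ n →
      ∀ (seen : PySem.Set String) (frontier : List String),
      aWhile (reverseInteractions pInteractions) border seen frontier =
      bWhile (PySem.Dict.ofList pInteractions) border seen frontier := by
    intro n
    induction n with
    | zero =>
        intro border h seen frontier
        have hb : border = [] := List.eq_nil_of_length_eq_zero (Nat.le_zero.mp h)
        subst hb
        simp [aWhile, bWhile]
    | succ n ih =>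
        intro border hlen seen frontier
        match border with
        | [] => simp [aWhile, bWhile]
        | b :: bs =>
            rw [aWhile, bWhile]
            rw [step_eq pInteractions ((b :: bs).getLast (by simp)) (seen, frontier)]
            apply ih
            simp at hlen ⊢
            omega
  intro border seen frontier
  exact main border.length border (Nat.le_refl _) seen frontier


-- ===== VERDICT (by name: the statement is the Claim_ definition above) =====
theorem getUpstream_spec : Claim_equal_getUpstream := by
  intro node distance pInteractions _
  unfold Spec_getUpstream getUpstream getUpstream_alt
  simp only [aWhile_eq_bWhile]
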